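-- pv_equiv track=rewrite | github.com/amir13872/Modulo-Magic | Modulo_Magic.py | find_divisible_numbers_and_sum
-- ===== SOURCE A (Python) =====
-- def is_divisible_by_numbers(number, divisors):
--     """
--     Checks if a number is divisible by any of the given divisors.
--
--     Args:
--         number (int): The number to check.
--         divisors (list): List of divisors to check against.
--
--     Returns:
--         bool: True if the number is divisible by any of the divisors, False otherwise.
--     """
--     return any(number % divisor == 0 for divisor in divisors)
--
-- def find_divisible_numbers_and_sum(start, end, divisors):
--     """
--     Finds all numbers in the range [start, end] that are divisible by any of the given divisors
--     and calculates their sum.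
--
--     Args:
--         start (int): Start of the range.
--         end (int): End of the range.
--         divisors (list): List of divisors to check against.
--
--     Returns:
--         tuple: (divisible_numbers (list), total_sum (int))
--     """
--     divisible_numbers = []
--     total_sum = 0
--
--     for num in range(start, end + 1):
--         if is_divisible_by_numbers(num, divisors):
--             divisible_numbers.append(num)
--             total_sum += num
--
--     return divisible_numbers, total_sum
-- ===== SOURCE B (Python) =====
-- def find_divisible_numbers_and_sum(start, end, divisors):
--     multiples = set()
--     for d in divisors:
--         step = abs(d)
--         first = -(-start // step) * step  # smallest multiple of step >= start
--         multiples.update(range(first, end + 1, step))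
--     numbers = sorted(multiples)
--     return numbers, sum(numbers)
-- ===== Notes on version B (the rewrite author's own statement) =====
-- stated objective: alternative
-- what changed: Instead of scanning every number in [start, end] and testing it against every divisor, B generates the arithmetic progression of multiples of each divisor directly, merges them in a set, and sorts once.
-- outside the precondition, e.g. on find_divisible_numbers_and_sum(5, 3, [0]): A returns ([], 0), B raises ZeroDivisionError; on find_divisible_numbers_and_sum(0, 2, [1, 0]): A returns ([0, 1, 2], 3), B raises ZeroDivisionError
import Mathlib
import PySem

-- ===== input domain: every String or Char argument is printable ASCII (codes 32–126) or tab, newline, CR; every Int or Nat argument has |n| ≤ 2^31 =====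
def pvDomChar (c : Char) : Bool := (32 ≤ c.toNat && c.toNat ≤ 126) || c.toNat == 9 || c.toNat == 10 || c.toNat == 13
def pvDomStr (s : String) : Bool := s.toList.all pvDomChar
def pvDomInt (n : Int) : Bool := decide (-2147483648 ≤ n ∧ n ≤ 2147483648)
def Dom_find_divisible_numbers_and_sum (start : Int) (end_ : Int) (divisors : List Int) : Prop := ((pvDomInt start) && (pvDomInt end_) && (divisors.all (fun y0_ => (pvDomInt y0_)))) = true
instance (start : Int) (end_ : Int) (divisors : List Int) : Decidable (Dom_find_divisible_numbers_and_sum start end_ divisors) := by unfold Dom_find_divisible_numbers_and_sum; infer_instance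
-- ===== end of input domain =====

-- B replaces A's scan of every number in [start, end] against every divisor by generating each
-- divisor's multiples in the range directly, merging them in a set and sorting once (objective: alternative).

-- ===== PORT A =====
def is_divisible_by_numbers (number : Int) (divisors : List Int) : Bool :=
  divisors.any (fun divisor => PySem.Int.mod number divisor == 0)

def find_divisible_numbers_and_sum (start : Int) (end_ : Int) (divisors : List Int) : List Int × Int :=
  (PySem.List.pyRange start (end_ + 1) 1).foldl
    (fun acc num =>
      if is_divisible_by_numbers num divisors then (acc.1 ++ [num], acc.2 + num) else acc)
    ([], 0)

-- ===== PORT B =====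
def find_divisible_numbers_and_sum_alt (start : Int) (end_ : Int) (divisors : List Int) : List Int × Int :=
  let multiples : PySem.Set Int := divisors.foldl
    (fun s d =>
      let step := |d|
      let first := -(PySem.Int.floordiv (-start) step) * step
      PySem.Set.update s (PySem.List.pyRange first (end_ + 1) step))
    PySem.Set.empty
  let numbers := PySem.List.sorted multiples (fun x => x)
  (numbers, numbers.sum)

-- ===== PRECONDITION & SPEC =====
-- Pre_ excludes divisor lists containing 0: there A raises ZeroDivisionError on the first range
-- element not already matched by an earlier divisor, and B always raises; on the remaining
-- 0-containing inputs (empty range, or every number matched earlier) A happens to return while B raises.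
def Pre_find_divisible_numbers_and_sum (start : Int) (end_ : Int) (divisors : List Int) : Prop :=
  0 ∉ divisors
instance (start : Int) (end_ : Int) (divisors : List Int) : Decidable (Pre_find_divisible_numbers_and_sum start end_ divisors) := by unfold Pre_find_divisible_numbers_and_sum; infer_instance

def pvWitness_find_divisible_numbers_and_sum : Int × Int × List Int := (1, 10, [2, 3])

def Spec_find_divisible_numbers_and_sum (start : Int) (end_ : Int) (divisors : List Int) (out : List Int × Int) : Prop := out = find_divisible_numbers_and_sum_alt start end_ divisors
instance (start : Int) (end_ : Int) (divisors : List Int) (out : List Int × Int) : Decidable (Spec_find_divisible_numbers_and_sum start end_ divisors out) := by unfold Spec_find_divisible_numbers_and_sum; infer_instance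

-- ===== CLAIM (what is proved, stated in full; the proofs are below) =====
def Claim_equal_find_divisible_numbers_and_sum : Prop := ∀ (start : Int) (end_ : Int) (divisors : List Int), Dom_find_divisible_numbers_and_sum start end_ divisors → Pre_find_divisible_numbers_and_sum start end_ divisors → Spec_find_divisible_numbers_and_sum start end_ divisors (find_divisible_numbers_and_sum start end_ divisors)

-- ===== LEMMAS AND PROOFS =====

-- A's loop over the range is "filter, and sum of the filter".
lemma foldA (l : List Int) (p : Int → Bool) (xs : List Int) (s : Int) :
    l.foldl (fun acc num => if p num then (acc.1 ++ [num], acc.2 + num) else acc) (xs, s)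
      = (xs ++ l.filter p, s + (l.filter p).sum) := by
  induction l generalizing xs s with
  | nil => simp
  | cons a t ih =>
    rw [List.foldl_cons, List.filter_cons]
    by_cases h : p a
    · simp only [h, if_true]
      rw [ih]
      simp [add_comm, add_left_comm]
      omega
    · simp only [h, if_false, Bool.false_eq_true]
      rw [ih]

-- The arithmetic progression B generates for divisor d is exactly d's multiples in [start, end_].
lemma mem_progression (start end_ d : Int) (hd : d ≠ 0) (y : Int) :
    y ∈ PySem.List.pyRange (-(PySem.Int.floordiv (-start) |d|) * |d|) (end_ + 1) |d|
      ↔ start ≤ y ∧ y ≤ end_ ∧ d ∣ y := by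
  have hstep : 0 < |d| := abs_pos.mpr hd
  set q : Int := -(PySem.Int.floordiv (-start) |d|) with hq
  have hchar : (q - 1) * |d| < start ∧ start ≤ q * |d| :=
    (PySem.Int.neg_floordiv_neg_eq_iff_of_pos hstep).mp hq.symm
  rw [PySem.List.mem_pyRange_iff_of_pos hstep]
  constructor
  · rintro ⟨h1, h2, h3⟩
    have hdy : |d| ∣ y := by
      have := dvd_add h3 (dvd_mul_left |d| q)
      simpa using this
    exact ⟨le_trans hchar.2 h1, by omega, (abs_dvd d y).mp hdy⟩
  · rintro ⟨h1, h2, h3⟩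
    have hdy : |d| ∣ y := (abs_dvd d y).mpr h3
    obtain ⟨m, hm⟩ := hdy
    have hqm : q ≤ m := by
      have h4 : (q - 1) * |d| < m * |d| := by rw [mul_comm m |d|, ← hm]; exact lt_of_lt_of_le hchar.1 h1
      have := lt_of_mul_lt_mul_right h4 (le_of_lt hstep)
      omega
    refine ⟨by nlinarith, by omega, ?_⟩
    exact dvd_sub ⟨m, hm⟩ (dvd_mul_left |d| q)

-- B's set loop: nodup, and membership is "multiple of some divisor, inside the range".
lemma fold_set (divisors : List Int) (start end_ : Int) (s : PySem.Set Int) (hn : s.Nodup) :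
    (divisors.foldl
      (fun s d => PySem.Set.update s
        (PySem.List.pyRange (-(PySem.Int.floordiv (-start) |d|) * |d|) (end_ + 1) |d|)) s).Nodup
    ∧ ∀ y, y ∈ divisors.foldl
      (fun s d => PySem.Set.update s
        (PySem.List.pyRange (-(PySem.Int.floordiv (-start) |d|) * |d|) (end_ + 1) |d|)) s
      ↔ y ∈ s ∨ ∃ d ∈ divisors,
          y ∈ PySem.List.pyRange (-(PySem.Int.floordiv (-start) |d|) * |d|) (end_ + 1) |d| := by
  induction divisors generalizing s with
  | nil => simpa using hn
  | cons a t ih =>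
    have hn' := PySem.Set.nodup_update s
      (PySem.List.pyRange (-(PySem.Int.floordiv (-start) |a|) * |a|) (end_ + 1) |a|) hn
    obtain ⟨ihn, ihm⟩ := ih _ hn'
    refine ⟨ihn, fun y => ?_⟩
    rw [List.foldl_cons, ihm, PySem.Set.mem_update]
    constructor
    · rintro ((h | h) | ⟨d, hd, h⟩)
      · exact Or.inl h
      · exact Or.inr ⟨a, List.mem_cons_self, h⟩
      · exact Or.inr ⟨d, List.mem_cons_of_mem _ hd, h⟩
    · rintro (h | ⟨d, hd, h⟩)
      · exact Or.inl (Or.inl h)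
      · rcases List.mem_cons.mp hd with rfl | hd
        · exact Or.inl (Or.inr h)
        · exact Or.inr ⟨d, hd, h⟩

-- ===== VERDICT (by name: the statement is the Claim_ definition above) =====
theorem find_divisible_numbers_and_sum_spec : Claim_equal_find_divisible_numbers_and_sum := by
  intro start end_ divisors _ hpre
  unfold Spec_find_divisible_numbers_and_sum
  unfold find_divisible_numbers_and_sum find_divisible_numbers_and_sum_alt
  simp only []
  set p : Int → Bool := fun num => is_divisible_by_numbers num divisors with hp
  set F : List Int := (PySem.List.pyRange start (end_ + 1) 1).filter p with hF
  rw [foldA]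
  obtain ⟨hnodup, hmem⟩ := fold_set divisors start end_ PySem.Set.empty (by simp [PySem.Set.empty])
  have hmemF : ∀ y, y ∈ F ↔ start ≤ y ∧ y ≤ end_ ∧ ∃ d ∈ divisors, d ∣ y := by
    intro y
    rw [hF, List.mem_filter, PySem.List.mem_pyRange_one, hp]
    simp only [is_divisible_by_numbers, List.any_eq_true]
    constructor
    · rintro ⟨⟨h1, h2⟩, d, hd, hdvd⟩
      exact ⟨h1, by omega, d, hd, (PySem.Int.mod_eq_zero_iff_dvd y d).mp (by simpa using hdvd)⟩
    · rintro ⟨h1, h2, d, hd, hdvd⟩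
      exact ⟨⟨h1, by omega⟩, d, hd, by simp [(PySem.Int.mod_eq_zero_iff_dvd y d).mpr hdvd]⟩
  have hperm : F.Perm (divisors.foldl
      (fun s d => PySem.Set.update s
        (PySem.List.pyRange (-(PySem.Int.floordiv (-start) |d|) * |d|) (end_ + 1) |d|))
      PySem.Set.empty) := by
    rw [List.perm_ext_iff_of_nodup (List.Nodup.filter _ (PySem.List.nodup_pyRange_one _ _)) hnodup]
    intro y
    rw [hmemF, hmem]
    simp only [PySem.Set.empty]
    constructor
    · rintro ⟨h1, h2, d, hd, hdvd⟩
      have hd0 : d ≠ 0 := fun h => hpre (h ▸ hd)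
      exact Or.inr ⟨d, hd, (mem_progression start end_ d hd0 y).mpr ⟨h1, h2, hdvd⟩⟩
    · rintro (h | ⟨d, hd, h⟩)
      · simp at h
      · have hd0 : d ≠ 0 := fun h' => hpre (h' ▸ hd)
        obtain ⟨h1, h2, h3⟩ := (mem_progression start end_ d hd0 y).mp h
        exact ⟨h1, h2, d, hd, h3⟩
  have hsorted := PySem.List.sorted_eq_of_perm_of_pairwise_lt _ F (fun x => x) hperm
    (List.Pairwise.filter _ (PySem.List.pairwise_lt_pyRange_one start (end_ + 1)))
  rw [hsorted]
  simp only [List.nil_append, zero_add]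
  rfl
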